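-- pv_equiv track=rewrite | github.com/Eamon-fox/ln2-inventory-agent | scripts/recommend_position.py | find_consecutive_slots
-- ===== SOURCE A (Python) =====
-- def find_consecutive_slots(empty_positions, count):
--     """Find consecutive empty slots."""
--     if not empty_positions or count <= 0:
--         return []
--
--     consecutive_groups = []
--     current_group = [empty_positions[0]]
--
--     for i in range(1, len(empty_positions)):
--         if empty_positions[i] == current_group[-1] + 1:
--             current_group.append(empty_positions[i])
--         else:
--             if len(current_group) >= count:
--                 consecutive_groups.append(current_group[:count])
--             current_group = [empty_positions[i]]
--
--     # Check the last group
--     if len(current_group) >= count: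
--         consecutive_groups.append(current_group[:count])
--
--     return consecutive_groups
-- ===== SOURCE B (Python) =====
-- def find_consecutive_slots(empty_positions, count):
--     """Find consecutive empty slots."""
--     if not empty_positions or count <= 0:
--         return []
--     n = len(empty_positions)
--     return [empty_positions[i:i + count]
--             for i, p in enumerate(empty_positions)
--             if (i == 0 or empty_positions[i - 1] + 1 != p)
--             and i + count <= n
--             and all(empty_positions[i + j] + 1 == empty_positions[i + j + 1]
--                     for j in range(count - 1))]
-- ===== Notes on version B (the rewrite author's own statement) =====
-- stated objective: alternative
-- what changed: B drops A's running-group accumulator entirely: it scans indices, detects each run start by comparing with the predecessor, verifies in place that the window of count positions starting there is consecutive (short-circuiting at the first break), and emits the slice eps[i:i+count] directly, never materializing runs.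
import Mathlib
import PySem

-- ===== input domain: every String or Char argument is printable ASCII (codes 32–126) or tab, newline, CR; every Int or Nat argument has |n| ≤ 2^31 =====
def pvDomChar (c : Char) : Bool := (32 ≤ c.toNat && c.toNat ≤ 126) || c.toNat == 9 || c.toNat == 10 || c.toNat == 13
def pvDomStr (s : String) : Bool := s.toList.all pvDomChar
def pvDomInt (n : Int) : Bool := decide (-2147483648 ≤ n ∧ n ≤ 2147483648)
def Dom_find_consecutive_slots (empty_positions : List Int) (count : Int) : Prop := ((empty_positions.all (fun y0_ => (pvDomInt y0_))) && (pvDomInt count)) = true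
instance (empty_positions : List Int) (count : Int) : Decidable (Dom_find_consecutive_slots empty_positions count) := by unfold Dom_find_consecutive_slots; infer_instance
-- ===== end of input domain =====

-- B replaces A's running-accumulator/flush loop by an index-based window check: every run
-- start i is detected from its predecessor, verified consecutive for count steps in place,
-- and the answer is the slice eps[i:i+count]; alternative decomposition, same result.


-- ===== PORT A =====
-- one loop step of A: state = (consecutive_groups, current_group); current_group is always nonempty
def fcsStep (count : Int) (st : List (List Int) × List Int) (x : Int) : List (List Int) × List Int :=
  if x = st.2.getLast! + 1 then (st.1, st.2 ++ [x])
  else if (st.2.length : Int) ≥ count then (st.1 ++ [st.2.take count.toNat], [x])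
  else (st.1, [x])

def find_consecutive_slots (empty_positions : List Int) (count : Int) : List (List Int) :=
  match empty_positions with
  | [] => []
  | p0 :: rest =>
    if count ≤ 0 then []
    else
      -- current_group[:count] with count ≥ 1 is take count (exact here)
      let st := rest.foldl (fcsStep count) ([], [p0])
      if (st.2.length : Int) ≥ count then st.1 ++ [st.2.take count.toNat] else st.1

-- ===== PORT B =====
-- Source B's start test 'i == 0 or empty_positions[i-1] + 1 != p' (i-1 is in range when read)
def altStart (eps : List Int) (i : Int) (p : Int) : Bool :=
  (i == 0) || !(PySem.List.pyGetD eps (i - 1) 0 + 1 == p)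

-- Source B's 'i + count <= n and all(eps[i+j] + 1 == eps[i+j+1] for j in range(count - 1))'
-- (all indices read are nonnegative and in range thanks to the first conjunct)
def altWindowOk (eps : List Int) (i : Int) (count : Int) : Bool :=
  decide (i + count ≤ (eps.length : Int)) &&
  (PySem.List.pyRange 0 (count - 1) 1).all (fun j =>
    PySem.List.pyGetD eps (i + j) 0 + 1 == PySem.List.pyGetD eps (i + j + 1) 0)

def find_consecutive_slots_alt (empty_positions : List Int) (count : Int) : List (List Int) :=
  if empty_positions = [] ∨ count ≤ 0 then []
  else ((PySem.List.enumerate empty_positions 0).filter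
      (fun ip => altStart empty_positions ip.1 ip.2 && altWindowOk empty_positions ip.1 count)).map
    (fun ip => PySem.List.slice empty_positions (some ip.1) (some (ip.1 + count)))

-- ===== PRECONDITION & SPEC =====
def Spec_find_consecutive_slots (empty_positions : List Int) (count : Int) (out : List (List Int)) : Prop := out = find_consecutive_slots_alt empty_positions count
instance (empty_positions : List Int) (count : Int) (out : List (List Int)) : Decidable (Spec_find_consecutive_slots empty_positions count out) := by unfold Spec_find_consecutive_slots; infer_instance

-- ===== CLAIM (what is proved, stated in full; the proofs are below) =====
def Claim_equal_find_consecutive_slots : Prop := ∀ (empty_positions : List Int) (count : Int), Dom_find_consecutive_slots empty_positions count → Spec_find_consecutive_slots empty_positions count (find_consecutive_slots empty_positions count)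

-- ===== LEMMAS AND PROOFS =====

-- proof-side device: the maximal +1-consecutive runs of a list, and the groups emitted for them
-- splitRun prev xs = (longest prefix of xs continuing the run ending at prev, the rest)
def splitRun (prev : Int) : List Int → List Int × List Int
  | [] => ([], [])
  | x :: xs =>
    if x = prev + 1 then
      let r := splitRun x xs
      (x :: r.1, r.2)
    else ([], x :: xs)

theorem splitRun_rest_le (prev : Int) (xs : List Int) : (splitRun prev xs).2.length ≤ xs.length := by
  induction xs generalizing prev with
  | nil => simp [splitRun]
  | cons x xs ih =>
    simp only [splitRun]
    split
    · exact Nat.le_succ_of_le (ih x)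
    · simp

def pyRuns : List Int → List (List Int)
  | [] => []
  | x :: xs => (x :: (splitRun x xs).1) :: pyRuns (splitRun x xs).2
  termination_by l => l.length
  decreasing_by exact Nat.lt_succ_of_le (splitRun_rest_le x xs)

def emitRuns (count : Int) (xs : List Int) : List (List Int) :=
  ((pyRuns xs).filter (fun run => (run.length : Int) ≥ count)).map (fun run => run.take count.toNat)

theorem splitRun_append (p : Int) (xs : List Int) :
    (splitRun p xs).1 ++ (splitRun p xs).2 = xs := by
  induction xs generalizing p with
  | nil => simp [splitRun]
  | cons x xs ih =>
    simp only [splitRun]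
    split
    · simpa using ih x
    · simp

theorem splitRun_consec (p : Int) (xs : List Int) :
    ∀ k : Nat, k < (splitRun p xs).1.length →
      (p :: (splitRun p xs).1).getD k 0 + 1 = (p :: (splitRun p xs).1).getD (k + 1) 0 := by
  induction xs generalizing p with
  | nil => simp [splitRun]
  | cons x xs ih =>
    intro k hk
    by_cases hx : x = p + 1
    · simp only [splitRun, if_pos hx] at hk ⊢
      cases k with
      | zero => simp [hx]
      | succ k =>
        simp only [List.length_cons, Nat.succ_lt_succ_iff] at hk
        simpa using ih x k hk
    · simp [splitRun, if_neg hx] at hk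

theorem splitRun_break (p : Int) (xs : List Int) :
    ∀ z zs, (splitRun p xs).2 = z :: zs →
      z ≠ (p :: (splitRun p xs).1).getD (splitRun p xs).1.length 0 + 1 := by
  induction xs generalizing p with
  | nil => simp [splitRun]
  | cons x xs ih =>
    intro z zs h
    by_cases hx : x = p + 1
    · simp only [splitRun, if_pos hx] at h ⊢
      simpa using ih x z zs h
    · simp only [splitRun, if_neg hx] at h ⊢
      rw [List.cons.injEq] at h
      simp [← h.1]
      omega

theorem getLast!_concat (l : List Int) (x : Int) : (l ++ [x]).getLast! = x := by
  induction l with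
  | nil => rfl
  | cons y l ih =>
    cases l with
    | nil => rfl
    | cons z l => simpa using ih

theorem emitRuns_cons (count x : Int) (xs : List Int) :
    emitRuns count (x :: xs) =
      (if ((x :: (splitRun x xs).1).length : Int) ≥ count
        then [(x :: (splitRun x xs).1).take count.toNat] else [])
      ++ emitRuns count (splitRun x xs).2 := by
  simp only [emitRuns, pyRuns, List.filter_cons]
  split <;> simp_all

-- A's loop invariant: running A's fold from (acc, cur) with cur nonempty and then flushing
-- equals acc, plus cur extended by the run continuing cur.getLast!, plus emitRuns on the rest
theorem loop_inv (count : Int) (xs : List Int) (acc : List (List Int)) (cur : List Int)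
    (hcur : cur ≠ []) :
    (let st := xs.foldl (fcsStep count) (acc, cur)
     if (st.2.length : Int) ≥ count then st.1 ++ [st.2.take count.toNat] else st.1) =
    acc ++
      (let r := splitRun cur.getLast! xs
       (if ((cur ++ r.1).length : Int) ≥ count then [(cur ++ r.1).take count.toNat] else [])
        ++ emitRuns count r.2) := by
  induction xs generalizing acc cur with
  | nil =>
    simp only [List.foldl, splitRun, emitRuns, pyRuns]
    split <;> simp_all
  | cons x xs ih =>
    by_cases h : x = cur.getLast! + 1
    · have hsr : splitRun cur.getLast! (x :: xs) =
          (x :: (splitRun x xs).1, (splitRun x xs).2) := by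
        simp only [splitRun, if_pos h]
      have hstep : fcsStep count (acc, cur) x = (acc, cur ++ [x]) := by
        simp [fcsStep, h]
      have h2 := ih acc (cur ++ [x]) (by simp)
      rw [getLast!_concat] at h2
      simp only [List.foldl, hstep]
      rw [h2, hsr]
      simp
    · have hsr : splitRun cur.getLast! (x :: xs) = ([], x :: xs) := by
        simp only [splitRun, if_neg h]
      have hstep : fcsStep count (acc, cur) x =
          (acc ++ (if (cur.length : Int) ≥ count then [cur.take count.toNat] else []), [x]) := by
        simp only [fcsStep, if_neg h]
        split <;> simp_all
      have h2 := ih (acc ++ (if (cur.length : Int) ≥ count then [cur.take count.toNat] else []))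
        [x] (by simp)
      rw [show ([x] : List Int).getLast! = x from by simp] at h2
      simp only [List.foldl, hstep]
      rw [h2, hsr, emitRuns_cons]
      simp [List.append_assoc]

-- B's side helper facts
theorem drop_getD (eps : List Int) (off k : Nat) :
    (eps.drop off).getD k 0 = eps.getD (off + k) 0 := by
  simp [List.getD_eq_getElem?_getD, List.getElem?_drop]

theorem pyGetD_off (eps : List Int) (off k : Nat) :
    PySem.List.pyGetD eps ((off : Int) + (k : Int)) 0 = (eps.drop off).getD k 0 := by
  have : ((off : Int) + (k : Int)) = ((off + k : Nat) : Int) := by push_cast; ring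
  rw [this, PySem.List.pyGetD_natCast, drop_getD]

-- B's side: the enumerate/filter/map comprehension over a suffix equals emitRuns of that suffix
theorem alt_runs (count : Int) (hc : 1 ≤ count) (eps : List Int) (off : Nat) (ys : List Int)
    (hdrop : eps.drop off = ys)
    (hstart : off = 0 ∨ ∀ (y : Int) (t : List Int), ys = y :: t →
      PySem.List.pyGetD eps ((off : Int) - 1) 0 + 1 ≠ y) :
    ((PySem.List.enumerate ys (off : Int)).filter
        (fun ip => altStart eps ip.1 ip.2 && altWindowOk eps ip.1 count)).map
      (fun ip => PySem.List.slice eps (some ip.1) (some (ip.1 + count))) = emitRuns count ys := by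
  match ys with
  | [] => simp [emitRuns, pyRuns, PySem.List.enumerate]
  | y :: t =>
    have hoff : off < eps.length := by
      by_contra hco
      have : eps.drop off = [] := List.drop_eq_nil_of_le (by omega)
      simp [this] at hdrop
    have hlen : eps.length = off + 1 + t.length := by
      have := congrArg List.length hdrop
      simp [List.length_drop] at this
      omega
    have happ : (splitRun y t).1 ++ (splitRun y t).2 = t := splitRun_append y t
    have hrl : (splitRun y t).1.length + (splitRun y t).2.length = t.length := by
      have := congrArg List.length happ; simpa using this
    -- reading eps at off + k lands in y :: t
    have hidx : ∀ k : Nat, PySem.List.pyGetD eps ((off : Int) + (k : Int)) 0 = (y :: t).getD k 0 := by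
      intro k; rw [pyGetD_off, hdrop]
    -- the first run, as read through (y :: t)
    have hgetr : ∀ k : Nat, k < (splitRun y t).1.length + 1 →
        (y :: t).getD k 0 = (y :: (splitRun y t).1).getD k 0 := by
      intro k hk
      have : y :: t = (y :: (splitRun y t).1) ++ (splitRun y t).2 := by simp [happ]
      rw [this, List.getD_append _ _ _ _ (by simpa using hk)]
    -- tail of the first run: the start test fails
    have hmid : ∀ ip ∈ PySem.List.enumerate (splitRun y t).1 ((off : Int) + 1),
        (altStart eps ip.1 ip.2 && altWindowOk eps ip.1 count) = false := by
      intro ip hip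
      obtain ⟨k, hk, rfl⟩ := (PySem.List.mem_enumerate_iff _ _ _).mp hip
      have hs : altStart eps ((off : Int) + 1 + (k : Int)) (splitRun y t).1[k] = false := by
        have h1 : ((off : Int) + 1 + (k : Int)) - 1 = (off : Int) + (k : Int) := by ring
        have h2 : PySem.List.pyGetD eps ((off : Int) + (k : Int)) 0 + 1 =
            (splitRun y t).1[k] := by
          rw [hidx k, hgetr k (by omega)]
          have h3 := splitRun_consec y t k hk
          rw [h3]
          have : (y :: (splitRun y t).1).getD (k + 1) 0 = (splitRun y t).1.getD k 0 := by simp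
          rw [this, List.getD_eq_getElem _ _ hk]
        simp only [altStart, h1, h2]
        simp
        omega
      simp [hs]
    -- the window test at the run start off reads exactly "count ≤ run length"
    have hwin : altWindowOk eps ((off : Int)) count =
        decide (((y :: (splitRun y t).1).length : Int) ≥ count) := by
      by_cases hcle : count ≤ (splitRun y t).1.length + 1
      · have h1 : (off : Int) + count ≤ (eps.length : Int) := by
          push_cast [hlen]; omega
        have h2 : (PySem.List.pyRange 0 (count - 1) 1).all (fun j =>
            PySem.List.pyGetD eps ((off : Int) + j) 0 + 1 ==
            PySem.List.pyGetD eps ((off : Int) + j + 1) 0) = true := by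
          rw [List.all_eq_true]
          intro j hj
          have hj2 := (PySem.List.mem_pyRange_one.mp hj)
          have hk : j = ((j.toNat : Nat) : Int) := by omega
          set k := j.toNat with hkdef
          have hkr : k + 1 < (splitRun y t).1.length + 1 := by omega
          have e1 : (off : Int) + j = (off : Int) + (k : Int) := by omega
          have e2 : (off : Int) + j + 1 = (off : Int) + ((k + 1 : Nat) : Int) := by push_cast; omega
          rw [e2, e1, hidx k, hidx (k + 1), hgetr k (by omega), hgetr (k + 1) hkr]
          simp only [beq_iff_eq]
          exact splitRun_consec y t k (by omega)
        simp only [altWindowOk, h2, Bool.and_true]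
        simp only [List.length_cons]
        rw [decide_eq_true h1, decide_eq_true (by push_cast; omega)]
      · -- count > run length: either out of bounds, or the check hits the break
        by_cases hn : (off : Int) + count ≤ (eps.length : Int)
        · obtain ⟨z, zs, hz⟩ : ∃ z zs, (splitRun y t).2 = z :: zs := by
            cases hzz : (splitRun y t).2 with
            | nil => exfalso; rw [hzz] at hrl; simp only [List.length_nil] at hrl; push_cast [hlen] at hn; omega
            | cons z zs => exact ⟨z, zs, rfl⟩
          have hall : (PySem.List.pyRange 0 (count - 1) 1).all (fun j =>
              PySem.List.pyGetD eps ((off : Int) + j) 0 + 1 ==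
              PySem.List.pyGetD eps ((off : Int) + j + 1) 0) = false := by
            rw [List.all_eq_false]
            refine ⟨((splitRun y t).1.length : Int), PySem.List.mem_pyRange_one.mpr (by omega), ?_⟩
            have e1 : (off : Int) + ((splitRun y t).1.length : Int) =
                (off : Int) + (((splitRun y t).1.length : Nat) : Int) := rfl
            have e2 : (off : Int) + ((splitRun y t).1.length : Int) + 1 =
                (off : Int) + (((splitRun y t).1.length + 1 : Nat) : Int) := by push_cast; ring
            rw [e2, e1, hidx, hidx, hgetr (splitRun y t).1.length (by omega)]
            have hz0 : (y :: t).getD ((splitRun y t).1.length + 1) 0 = z := by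
              have : y :: t = (y :: (splitRun y t).1) ++ (splitRun y t).2 := by simp [happ]
              rw [this, List.getD_append_right _ _ _ _ (by simp)]
              simp [hz]
            rw [hz0]
            simp only [beq_iff_eq]
            exact fun hEq => (splitRun_break y t z zs hz) hEq.symm
          simp only [altWindowOk, hall, Bool.and_false]
          simp only [List.length_cons]
          rw [decide_eq_false (by push_cast; omega)]
        · simp only [altWindowOk, decide_eq_false hn, Bool.false_and]
          simp only [List.length_cons]
          rw [decide_eq_false (by push_cast [hlen] at hn ⊢; omega)]
    -- the start test at off passes
    have hstart0 : altStart eps ((off : Int)) y = true := by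
      rcases hstart with h0 | hne
      · simp [altStart, h0]
      · have := hne y t rfl
        simp [altStart, this]
    -- the slice emitted at off is the truncated first run
    have hslice : count ≤ (splitRun y t).1.length + 1 →
        PySem.List.slice eps (some (off : Int)) (some ((off : Int) + count)) =
          (y :: (splitRun y t).1).take count.toNat := by
      intro hcle
      have e : (off : Int) + count = (off : Int) + ((count.toNat : Nat) : Int) := by omega
      rw [e, PySem.List.slice_natCast_add, hdrop]
      have : y :: t = (y :: (splitRun y t).1) ++ (splitRun y t).2 := by simp [happ]
      rw [this, List.take_append_of_le_length (by simp; omega)]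
    -- the recursive step on the rest
    have hrec := alt_runs count hc eps (off + 1 + (splitRun y t).1.length) (splitRun y t).2
      (by rw [show off + 1 + (splitRun y t).1.length = off + (1 + (splitRun y t).1.length) from by omega,
              ← List.drop_drop, hdrop,
              show y :: t = (y :: (splitRun y t).1) ++ (splitRun y t).2 from by simp [happ],
              show 1 + (splitRun y t).1.length = (y :: (splitRun y t).1).length from by simp; omega,
              List.drop_left])
      (Or.inr (by
        intro z zs hz
        have e : ((off + 1 + (splitRun y t).1.length : Nat) : Int) - 1 =
            (off : Int) + (((splitRun y t).1.length : Nat) : Int) := by push_cast; ring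
        rw [e, hidx, hgetr _ (by omega)]
        have := splitRun_break y t z zs hz
        omega))
    -- assemble
    have hsplit : PySem.List.enumerate (y :: t) ((off : Int)) =
        ((off : Int), y) :: PySem.List.enumerate (splitRun y t).1 ((off : Int) + 1)
          ++ PySem.List.enumerate (splitRun y t).2 ((off + 1 + (splitRun y t).1.length : Nat) : Int) := by
      have h1 : y :: t = (y :: (splitRun y t).1) ++ (splitRun y t).2 := by simp [happ]
      have estart : ((off + 1 + (splitRun y t).1.length : Nat) : Int) =
          (off : Int) + ((y :: (splitRun y t).1).length : Int) := by push_cast; simp; ring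
      rw [h1, PySem.List.enumerate_append, PySem.List.enumerate_cons, ← estart]
    rw [hsplit, List.filter_append, List.map_append, hrec, emitRuns_cons]
    congr 1
    rw [List.filter_cons]
    have hfmid : (PySem.List.enumerate (splitRun y t).1 ((off : Int) + 1)).filter
        (fun ip => altStart eps ip.1 ip.2 && altWindowOk eps ip.1 count) = [] :=
      List.filter_eq_nil_iff.mpr (by intro a ha; simp [hmid a ha])
    simp only [hstart0, hwin, Bool.true_and, hfmid]
    by_cases hge : (((y :: (splitRun y t).1).length : Int) ≥ count)
    · rw [if_pos (by simpa using hge), if_pos hge]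
      simp [hslice (by simp only [List.length_cons] at hge; push_cast at hge ⊢; omega)]
    · rw [if_neg (by simpa using hge), if_neg hge]
      simp
  termination_by ys.length
  decreasing_by simp; have := splitRun_rest_le y t; omega

-- ===== VERDICT (by name: the statement is the Claim_ definition above) =====
theorem find_consecutive_slots_spec : Claim_equal_find_consecutive_slots := by
  intro eps count _
  unfold Spec_find_consecutive_slots find_consecutive_slots find_consecutive_slots_alt
  cases eps with
  | nil => simp
  | cons p0 rest =>
    by_cases hc : count ≤ 0
    · simp [hc]
    · simp only [reduceCtorEq, hc, or_self, if_false]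
      have h := loop_inv count rest [] [p0] (by simp)
      rw [show ([p0] : List Int).getLast! = p0 from by simp] at h
      have h2 := alt_runs count (by omega) (p0 :: rest) 0 (p0 :: rest) (by simp) (Or.inl rfl)
      rw [show ((0 : Nat) : Int) = 0 from rfl] at h2
      rw [h2, h, emitRuns_cons]
      simp
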